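-- pv_equiv track=rewrite | github.com/logicminds/lyriq-price-analysis | extract_chart_data.py | generate_color_palette_js
-- ===== SOURCE A (Python) =====
-- from typing import Dict, List, Any
--
-- def generate_color_palette_js(trims: List[str]) -> str:
--     """
--     Generate JavaScript color palette for trims.
--
--     Args:
--         trims: List of trim names
--
--     Returns:
--         JavaScript color palette object
--     """
--     # Color palette for trims
--     color_mapping = {
--         'Luxury': '#4ECDC4',
--         'Luxury 1': '#45B7D1',
--         'Luxury 2': '#96CEB4',
--         'Luxury 3': '#FFEAA7',
--         'Sport 1': '#DDA0DD',
--         'Sport 2': '#98D8C8',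
--         'Sport 3': '#F7DC6F',
--         'Tech': '#BB8FCE',
--         'V-Series': '#FF6B6B'
--     }
--
--     js_lines = ['// Color palette for trim levels', 'const trimColors = {']
--
--     for i, trim in enumerate(trims):
--         color = color_mapping.get(trim, '#CCCCCC')  # Default gray for unknown trims
--         comma = ',' if i < len(trims) - 1 else ''
--         js_lines.append(f"    '{trim}': '{color}'{comma}")
--
--     js_lines.append('};')
--     return '\n'.join(js_lines)
-- ===== SOURCE B (Python) =====
-- from typing import List
--
--
-- def generate_color_palette_js(trims: List[str]) -> str:
--     """Build the output back-to-front: walk trims in reverse collecting pieces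
--     (footer first), with the comma carried as loop state so the last entry,
--     processed first, naturally gets none; finally join the reversed pieces."""
--     color_mapping = {
--         'Luxury': '#4ECDC4',
--         'Luxury 1': '#45B7D1',
--         'Luxury 2': '#96CEB4',
--         'Luxury 3': '#FFEAA7',
--         'Sport 1': '#DDA0DD',
--         'Sport 2': '#98D8C8',
--         'Sport 3': '#F7DC6F',
--         'Tech': '#BB8FCE',
--         'V-Series': '#FF6B6B'
--     }
--     pieces = ['};']
--     comma = ''
--     for trim in reversed(trims):
--         color = color_mapping.get(trim, '#CCCCCC')
--         pieces.append(f"    '{trim}': '{color}'{comma}\n")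
--         comma = ','
--     pieces.append('// Color palette for trim levels\nconst trimColors = {\n')
--     return ''.join(reversed(pieces))
-- ===== Notes on version B (the rewrite author's own statement) =====
-- stated objective: alternative
-- what changed: Builds the output back-to-front: iterates reversed(trims), collecting footer-first pieces with the separator carried as loop state (the last entry, processed first, gets no comma), then joins the reversed pieces; replaces A's forward enumerate loop with per-index trailing-comma tests and a '\n'.join of lines.
import Mathlib
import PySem

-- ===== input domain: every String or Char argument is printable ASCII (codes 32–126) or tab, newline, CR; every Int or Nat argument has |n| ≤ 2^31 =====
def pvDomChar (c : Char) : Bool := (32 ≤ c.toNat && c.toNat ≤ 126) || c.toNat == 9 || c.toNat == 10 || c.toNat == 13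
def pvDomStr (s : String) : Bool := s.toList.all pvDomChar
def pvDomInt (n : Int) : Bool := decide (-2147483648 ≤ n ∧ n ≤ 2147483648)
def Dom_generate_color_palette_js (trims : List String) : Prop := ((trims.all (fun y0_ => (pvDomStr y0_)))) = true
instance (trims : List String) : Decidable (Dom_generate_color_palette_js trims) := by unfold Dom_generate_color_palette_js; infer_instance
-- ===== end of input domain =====

-- B builds the output back-to-front: pieces collected over reversed(trims) with the separator as loop state, joined at the end; an alternative decomposition, no speed claim.

-- shared module constant: the literal color_mapping dict
def pvColorMap : PySem.Dict String String :=
  PySem.Dict.ofList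
    [("Luxury", "#4ECDC4"), ("Luxury 1", "#45B7D1"), ("Luxury 2", "#96CEB4"),
     ("Luxury 3", "#FFEAA7"), ("Sport 1", "#DDA0DD"), ("Sport 2", "#98D8C8"),
     ("Sport 3", "#F7DC6F"), ("Tech", "#BB8FCE"), ("V-Series", "#FF6B6B")]

-- ===== PORT A =====
def generate_color_palette_js (trims : List String) : String :=
  let js0 : List String := ["// Color palette for trim levels", "const trimColors = {"]
  let js1 := (PySem.List.enumerate trims).foldl (fun acc p =>
    let color := pvColorMap.getD p.2 "#CCCCCC"
    let comma := if p.1 < (trims.length : Int) - 1 then "," else ""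
    acc ++ ["    '" ++ p.2 ++ "': '" ++ color ++ "'" ++ comma]) js0
  PySem.Str.join "\n" (js1 ++ ["};"])

-- ===== PORT B =====
def generate_color_palette_js_alt (trims : List String) : String :=
  let st := trims.reverse.foldl (fun (st : List String × String) trim =>
    let color := pvColorMap.getD trim "#CCCCCC"
    (st.1 ++ ["    '" ++ trim ++ "': '" ++ color ++ "'" ++ st.2 ++ "\n"], ",")) (["};"], "")
  let pieces := st.1 ++ ["// Color palette for trim levels\nconst trimColors = {\n"]
  PySem.Str.join "" pieces.reverse

-- ===== PRECONDITION & SPEC =====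
def Spec_generate_color_palette_js (trims : List String) (out : String) : Prop := out = generate_color_palette_js_alt trims
instance (trims : List String) (out : String) : Decidable (Spec_generate_color_palette_js trims out) := by unfold Spec_generate_color_palette_js; infer_instance

-- ===== CLAIM (what is proved, stated in full; the proofs are below) =====
def Claim_equal_generate_color_palette_js : Prop := ∀ (trims : List String), Dom_generate_color_palette_js trims → Spec_generate_color_palette_js trims (generate_color_palette_js trims)

-- ===== LEMMAS AND PROOFS =====

def pvEntry (t : String) : String :=
  "    '" ++ t ++ "': '" ++ pvColorMap.getD t "#CCCCCC" ++ "'"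

-- entries with a trailing comma on all but the last
def pvWithCommas : List String → List String
  | [] => []
  | [x] => [x]
  | x :: y :: r => (x ++ ",") :: pvWithCommas (y :: r)

-- the body+footer string B's backward loop produces, as forward recursion
def pvBodyOf : List String → String
  | [] => "};"
  | [x] => x ++ "\n" ++ "};"
  | x :: y :: r => x ++ "," ++ "\n" ++ pvBodyOf (y :: r)

-- the pieces B's backward loop collects, in forward order
def pvPieces : List String → List String
  | [] => []
  | [x] => [pvEntry x ++ "" ++ "\n"]
  | x :: y :: r => (pvEntry x ++ "," ++ "\n") :: pvPieces (y :: r)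

theorem pv_foldl_append {α β : Type} (f : α → β) :
    ∀ (l : List α) (acc : List β),
      l.foldl (fun acc x => acc ++ [f x]) acc = acc ++ l.map f := by
  intro l
  induction l with
  | nil => simp
  | cons x xs ih => intro acc; simp [List.foldl, ih]

theorem pv_enum_commas :
    ∀ (ts : List String) (s : Int),
      (PySem.List.enumerate ts s).map
        (fun p : Int × String =>
          pvEntry p.2 ++ (if p.1 < s + (ts.length : Int) - 1 then "," else "")) =
      pvWithCommas (ts.map pvEntry) := by
  intro ts
  induction ts with
  | nil => intro s; simp [PySem.List.enumerate, pvWithCommas]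
  | cons x xs ih =>
    intro s
    rw [PySem.List.enumerate_cons]
    cases xs with
    | nil =>
      simp [PySem.List.enumerate, pvWithCommas]
    | cons y r =>
      have h1 : s < s + (((x :: y :: r) : List String).length : Int) - 1 := by
        simp only [List.length_cons]; push_cast; omega
      have hc : s + (((x :: y :: r) : List String).length : Int) - 1
          = (s + 1) + (((y :: r) : List String).length : Int) - 1 := by
        simp only [List.length_cons]; push_cast; omega
      simp only [List.map_cons, if_pos h1, pvWithCommas]
      congr 1
      simp only [hc]
      exact ih (s + 1)

theorem pvWithCommas_ne_nil (x : String) (l : List String) :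
    pvWithCommas (x :: l) ≠ [] := by
  cases l <;> simp [pvWithCommas]

theorem pv_join_cons_ne (sep H : List Char) (L : List (List Char)) (h : L ≠ []) :
    PySem.Chars.join sep (H :: L) = H ++ sep ++ PySem.Chars.join sep L := by
  cases L with
  | nil => exact absurd rfl h
  | cons a l =>
    cases l with
    | nil => simp [PySem.Chars.join_cons_cons, PySem.Chars.join_singleton]
    | cons b m => rw [PySem.Chars.join_cons_cons]

-- A's tail: joining the comma-decorated entries plus '};' equals pvBodyOf of the bare entries
theorem pv_join_withCommas :
    ∀ (ss : List String), ss ≠ [] →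
      PySem.Chars.join ['\n'] ((pvWithCommas ss).map String.toList ++ [("};" : String).toList]) =
      (pvBodyOf ss).toList := by
  intro ss
  induction ss with
  | nil => intro h; exact absurd rfl h
  | cons x xs ih =>
    intro _
    cases xs with
    | nil =>
      simp [pvWithCommas, pvBodyOf, PySem.Chars.join_cons_cons, PySem.Chars.join_singleton]
    | cons y r =>
      have htail := ih (by simp)
      simp only [pvWithCommas, pvBodyOf, List.map_cons, List.cons_append]
      rw [pv_join_cons_ne _ _ _ (by
        intro hcontra
        exact absurd (List.append_eq_nil_iff.mp hcontra).1
          (by simp [pvWithCommas_ne_nil]))]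
      rw [htail]
      simp

theorem pvPieces_ne_nil (x : String) (l : List String) :
    pvPieces (x :: l) ≠ [] := by
  cases l <;> simp [pvPieces]

-- invariant of B's backward loop (via foldr): footer piece, then the pieces in reverse
theorem pv_loop_inv :
    ∀ (ts : List String),
      ts.foldr (fun trim (st : List String × String) =>
        (st.1 ++ ["    '" ++ trim ++ "': '" ++ pvColorMap.getD trim "#CCCCCC" ++ "'" ++ st.2 ++ "\n"], ","))
        (["};"], "") =
      ("};" :: (pvPieces ts).reverse, if ts.isEmpty then "" else ",") := by
  intro ts
  induction ts with
  | nil => simp [pvPieces]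
  | cons x xs ih =>
    rw [List.foldr_cons, ih]
    cases xs with
    | nil => simp [pvPieces, pvEntry]
    | cons y r => simp [pvPieces, pvEntry]

-- concatenating the pieces plus the footer yields pvBodyOf of the entries
theorem pv_join_pieces :
    ∀ (ts : List String), ts ≠ [] →
      PySem.Chars.join [] ((pvPieces ts).map String.toList ++ [("};" : String).toList]) =
      (pvBodyOf (ts.map pvEntry)).toList := by
  intro ts
  induction ts with
  | nil => intro h; exact absurd rfl h
  | cons x xs ih =>
    intro _
    cases xs with
    | nil =>
      simp [pvPieces, pvBodyOf, PySem.Chars.join_cons_cons, PySem.Chars.join_singleton]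
    | cons y r =>
      have htail := ih (by simp)
      simp only [pvPieces, List.map_cons, List.cons_append]
      rw [pv_join_cons_ne _ _ _ (by
        intro hcontra
        exact absurd (List.append_eq_nil_iff.mp hcontra).1
          (by simp [pvPieces_ne_nil]))]
      rw [htail]
      simp [pvBodyOf]

-- ===== VERDICT (by name: the statement is the Claim_ definition above) =====
theorem generate_color_palette_js_spec : Claim_equal_generate_color_palette_js := by
  intro trims _
  show generate_color_palette_js trims = generate_color_palette_js_alt trims
  cases trims with
  | nil => decide
  | cons t ts =>
    unfold generate_color_palette_js generate_color_palette_js_alt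
    simp only [List.foldl_reverse]
    rw [pv_loop_inv (t :: ts)]
    simp only [List.reverse_append, List.reverse_cons, List.reverse_reverse,
      List.reverse_nil, List.nil_append, List.cons_append]
    apply String.toList_inj.mp
    rw [pv_foldl_append]
    have henum := pv_enum_commas (t :: ts) 0
    simp only [zero_add] at henum
    simp only [pvEntry] at henum
    rw [henum]
    rw [PySem.Str.toList_join]
    have hsep : ("\n" : String).toList = ['\n'] := by decide
    simp only [hsep, List.map_append, List.map_cons, List.map_nil,
      List.cons_append, List.nil_append]
    rw [pv_join_cons_ne _ _ _ (by simp)]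
    rw [pv_join_cons_ne _ _ _ (by simp)]
    rw [show pvEntry t :: ts.map pvEntry = (t :: ts).map pvEntry from rfl]
    rw [pv_join_withCommas ((t :: ts).map pvEntry) (by simp)]
    rw [PySem.Str.toList_join]
    have hsep0 : ("" : String).toList = ([] : List Char) := by decide
    simp only [hsep0, List.map_append, List.map_cons, List.map_nil]
    rw [pv_join_cons_ne _ _ _ (by
      intro hcontra
      exact absurd (List.append_eq_nil_iff.mp hcontra).1
        (by simp [pvPieces_ne_nil]))]
    rw [show pvEntry t :: ts.map pvEntry = (t :: ts).map pvEntry from rfl] at *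
    rw [pv_join_pieces (t :: ts) (by simp)]
    simp [pvEntry]
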